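-- pv_equiv track=rewrite | github.com/septem9907/algo | temp.py | solution
-- ===== SOURCE A (Python) =====
-- def solution(A):
--     # write your code in Python 3.6
--     if len(A) == 0:
--         return 0
--
--     B = [0] * len(A)
--
--     for i in range(len(A)-1):
--         if A[i] >= A[i + 1]:
--             continue
--         else:
--             B[i] = max(max(A[i+1:]) - A[i], 0)
--
--     return max(B)
-- ===== SOURCE B (Python) =====
-- def solution(A):
--     # One right-to-left pass keeping the running suffix maximum (O(n) instead of
--     # A's O(n^2) rescan of max(A[i+1:]) at every ascent).
--     if not A:
--         return 0
--     best = 0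
--     m = A[-1]
--     prev = A[-1]
--     for x in reversed(A[:-1]):
--         if x < prev:
--             best = max(best, m - x)
--         m = max(m, x)
--         prev = x
--     return best
-- ===== Notes on version B (the rewrite author's own statement) =====
-- stated objective: faster
-- what changed: replaces the per-index rescan max(A[i+1:]) and the auxiliary B list by a single right-to-left pass that maintains the running suffix maximum and the best difference
import Mathlib
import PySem

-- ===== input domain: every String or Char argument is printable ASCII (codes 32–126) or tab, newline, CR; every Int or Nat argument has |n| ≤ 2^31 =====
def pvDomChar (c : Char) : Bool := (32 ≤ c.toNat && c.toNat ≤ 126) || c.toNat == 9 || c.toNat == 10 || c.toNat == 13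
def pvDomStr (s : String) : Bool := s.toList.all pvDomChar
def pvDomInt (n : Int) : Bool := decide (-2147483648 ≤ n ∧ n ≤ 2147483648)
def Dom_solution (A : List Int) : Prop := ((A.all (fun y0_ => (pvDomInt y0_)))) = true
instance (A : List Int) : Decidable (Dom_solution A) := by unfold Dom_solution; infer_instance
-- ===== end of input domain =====

-- B replaces A's per-index rescan of max(A[i+1:]) by one right-to-left pass keeping the
-- running suffix maximum (O(n) instead of O(n^2)); same return value everywhere.

-- ===== PORT A =====
-- range(len(A)-1) with len(A) ≥ 1 is exactly List.range (A.length - 1);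
-- A[i], A[i+1] with 0 ≤ i < len(A)-1 are in range, ported as getD;
-- the slice A[i+1:] with i+1 ≥ 0 is exactly List.drop (i+1);
-- Python max(nonempty list) is PySem.List.max?, unwrapped with getD on the
-- always-`some` result (the slice and B are nonempty on every reachable call).
def solution (A : List Int) : Int :=
  if A.length = 0 then 0
  else
    let B0 : List Int := List.replicate A.length 0
    let B := (List.range (A.length - 1)).foldl
      (fun B i =>
        if A.getD i 0 ≥ A.getD (i + 1) 0 then B
        else B.set i (max ((PySem.List.max? (A.drop (i + 1)) (fun y => y)).getD 0 - A.getD i 0) 0))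
      B0
    (PySem.List.max? B (fun y => y)).getD 0

-- ===== PORT B =====
-- state (best, m, prev); the loop 'for x in reversed(A[:-1])' is a foldl over
-- A.dropLast.reverse; A[-1] on a nonempty list is getLast.
def stepB (st : Int × Int × Int) (x : Int) : Int × Int × Int :=
  (if x < st.2.2 then max st.1 (st.2.1 - x) else st.1, max st.2.1 x, x)

def solution_alt (A : List Int) : Int :=
  match A with
  | [] => 0
  | a :: rest =>
    let lst := (a :: rest).getLast (by simp)
    ((a :: rest).dropLast.reverse.foldl stepB (0, lst, lst)).1

-- ===== PRECONDITION & SPEC =====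
def Spec_solution (A : List Int) (out : Int) : Prop := out = solution_alt A
instance (A : List Int) (out : Int) : Decidable (Spec_solution A out) := by unfold Spec_solution; infer_instance

-- ===== CLAIM (what is proved, stated in full; the proofs are below) =====
def Claim_equal_solution : Prop := ∀ (A : List Int), Dom_solution A → Spec_solution A (solution A)

-- ===== LEMMAS AND PROOFS =====

-- max of a nonempty list as Python computes it
def listMax (l : List Int) : Int := (PySem.List.max? l (fun y => y)).getD 0

-- common recursive specification of the answer
def F : List Int → Int
  | [] => 0
  | [_] => 0
  | x :: y :: r => max (if x < y then max (r.foldl max y - x) 0 else 0) (F (y :: r))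

-- the value A's loop stores at index j (0 when the condition fails or j is the last index)
def entry (A : List Int) (j : ℕ) : Int :=
  if j + 1 < A.length ∧ A.getD j 0 < A.getD (j + 1) 0 then
    max (listMax (A.drop (j + 1)) - A.getD j 0) 0
  else 0

theorem F_nonneg (l : List Int) : 0 ≤ F l := by
  induction l using F.induct with
  | case1 => simp [F]
  | case2 => simp [F]
  | case3 x y r ih => simp [F]; omega

theorem foldl_max_shift (r : List Int) (a b : Int) :
    r.foldl max (max a b) = max a (r.foldl max b) := by
  induction r generalizing b with
  | nil => simp
  | cons h t ih => simp only [List.foldl_cons, max_assoc]; exact ih _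

theorem listMax_cons (h : Int) (t : List Int) : listMax (h :: t) = t.foldl max h := by
  simp [listMax, PySem.List.max?_id_cons]

theorem listMax_cons_cons (a h : Int) (t : List Int) :
    listMax (a :: h :: t) = max a (listMax (h :: t)) := by
  simp [listMax_cons, List.foldl_cons, foldl_max_shift]

theorem entry_cons_succ (x : Int) (rest : List Int) (j : ℕ) :
    entry (x :: rest) (j + 1) = entry rest j := by
  simp [entry, List.drop_succ_cons]

theorem entry_last (A : List Int) (j : ℕ) (h : ¬ j + 1 < A.length) : entry A j = 0 := by
  simp [entry, h]

-- the invariant of B's right-to-left loop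
theorem Binv (rest : List Int) (x : Int) :
    ((x :: rest).dropLast).foldr (fun a st => stepB st a)
      (0, (x :: rest).getLast (by simp), (x :: rest).getLast (by simp))
    = (F (x :: rest), rest.foldl max x, x) := by
  induction rest generalizing x with
  | nil => simp [F]
  | cons y r ih =>
    have hlast : (x :: y :: r).getLast (by simp) = (y :: r).getLast (by simp) := by
      simp [List.getLast_cons]
    have hdl : (x :: y :: r).dropLast = x :: (y :: r).dropLast := by
      simp [List.dropLast_cons₂]
    rw [hdl, List.foldr_cons, hlast, ih y]
    have hb := F_nonneg (y :: r)
    simp only [stepB, F, List.foldl_cons, Prod.mk.injEq]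
    refine ⟨?_, ?_, trivial⟩
    · split <;> omega
    · rw [foldl_max_shift r x y, max_comm]

theorem alt_eq_F (A : List Int) : solution_alt A = F A := by
  match A with
  | [] => simp [solution_alt, F]
  | a :: rest =>
    show ((a :: rest).dropLast.reverse.foldl stepB (0, _, _)).1 = _
    rw [List.foldl_reverse, Binv rest a]

-- characterisation of A's loop: after processing range k, B holds entry A j at j < k
theorem A_fold (A : List Int) (k : ℕ) (hk : k ≤ A.length - 1) :
    (List.range k).foldl
      (fun B i =>
        if A.getD i 0 ≥ A.getD (i + 1) 0 then B
        else B.set i (max ((PySem.List.max? (A.drop (i + 1)) (fun y => y)).getD 0 - A.getD i 0) 0))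
      (List.replicate A.length 0)
    = (List.range A.length).map (fun j => if j < k then entry A j else 0) := by
  induction k with
  | zero =>
    simp
  | succ k ih =>
    have hk' : k ≤ A.length - 1 := Nat.le_of_succ_le hk
    have hklt : k + 1 < A.length := by
      rcases A with _ | ⟨a, t⟩
      · simp at hk
      · simp at hk ⊢; omega
    rw [List.range_succ, List.foldl_append, ih hk', List.foldl_cons, List.foldl_nil]
    by_cases hc : A.getD k 0 ≥ A.getD (k + 1) 0
    · rw [if_pos hc]
      apply List.map_congr_left
      intro j _
      by_cases hj : j = k
      · subst hj
        simp only [lt_irrefl, if_false, Nat.lt_succ_self, if_true]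
        rw [entry]
        rw [if_neg]
        rintro ⟨-, h2⟩; omega
      · have : j < k ↔ j < k + 1 := by omega
        simp [this]
    · rw [if_neg hc]
      apply List.ext_getElem
      · simp
      · intro j h1 h2
        simp only [List.length_set, List.length_map, List.length_range] at h1 h2
        rw [List.getElem_set]
        by_cases hj : k = j
        · subst hj
          simp only [List.getElem_map, List.getElem_range, Nat.lt_succ_self, if_true]
          rw [entry, if_pos ⟨hklt, by omega⟩, listMax]
        · simp only [if_neg hj, List.getElem_map, List.getElem_range]
          have : j < k ↔ j < k + 1 := by omega
          simp [this]

theorem map_entry_eq_F (A : List Int) (h : A ≠ []) :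
    listMax ((List.range A.length).map (entry A)) = F A := by
  match A with
  | [x] =>
    simp [List.range_succ, entry, F, listMax_cons]
  | x :: y :: r =>
    have hlen : (x :: y :: r).length = ((y :: r).length) + 1 := by simp
    rw [hlen, List.range_succ_eq_map, List.map_cons, List.map_map]
    have hshift : (List.range (y :: r).length).map ((entry (x :: y :: r)) ∘ Nat.succ)
        = (List.range (y :: r).length).map (entry (y :: r)) := by
      apply List.map_congr_left
      intro j _
      exact entry_cons_succ x (y :: r) j
    rw [hshift]
    have hne : (List.range (y :: r).length).map (entry (y :: r)) ≠ [] := by simp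
    obtain ⟨h0, t0, ht⟩ := List.exists_cons_of_ne_nil hne
    rw [ht, listMax_cons_cons, ← ht, map_entry_eq_F (y :: r) (by simp)]
    have he : entry (x :: y :: r) 0 = if x < y then max (r.foldl max y - x) 0 else 0 := by
      simp only [entry, List.length_cons, List.getD_cons_zero, List.getD_cons_succ,
        List.drop_succ_cons, List.drop_zero]
      rw [listMax_cons]
      simp
    rw [he, F]

-- ===== VERDICT (by name: the statement is the Claim_ definition above) =====
theorem solution_spec : Claim_equal_solution := by
  intro A _
  show solution A = solution_alt A
  rw [alt_eq_F]
  rcases A with _ | ⟨a, t⟩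
  · simp [solution, F]
  · have hne : (a :: t).length ≠ 0 := by simp
    rw [solution, if_neg hne]
    have := A_fold (a :: t) ((a :: t).length - 1) (le_refl _)
    dsimp only
    rw [this]
    have hcongr : (List.range (a :: t).length).map
        (fun j => if j < (a :: t).length - 1 then entry (a :: t) j else 0)
      = (List.range (a :: t).length).map (entry (a :: t)) := by
      apply List.map_congr_left
      intro j hj
      rw [List.mem_range] at hj
      by_cases hjl : j < (a :: t).length - 1
      · rw [if_pos hjl]
      · rw [if_neg hjl, entry_last]
        omega
    rw [hcongr]
    exact map_entry_eq_F (a :: t) (by simp)
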